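-- pv_equiv track=rewrite | github.com/vvdvasan/kasparro-ai-representation-optimizer | src/audit_engine.py | audit_pages
-- ===== SOURCE A (Python) =====
-- def audit_pages(pages):
--     issues = []
--     found = [p["title"].lower() for p in pages]
--
--     # Check 13: Missing About Us
--     if "about us" not in found and "about" not in found:
--         issues.append({
--             "check": "Missing About Us Page",
--             "product": "Pages",
--             "severity": "HIGH",
--             "fix": "Add an 'About Us' page. AI agents use this to understand store identity."
--         })
--
--     # Check 14: Missing FAQ
--     if "faq" not in found and "frequently asked questions" not in found:
--         issues.append({
--             "check": "Missing FAQ Page",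
--             "product": "Pages",
--             "severity": "HIGH",
--             "fix": "Add a FAQ page. AI agents pull from FAQs to answer buyer questions."
--         })
--
--     return issues
-- ===== SOURCE B (Python) =====
-- _ABOUT_ISSUE = {
--     "check": "Missing About Us Page",
--     "product": "Pages",
--     "severity": "HIGH",
--     "fix": "Add an 'About Us' page. AI agents use this to understand store identity.",
-- }
-- _FAQ_ISSUE = {
--     "check": "Missing FAQ Page",
--     "product": "Pages",
--     "severity": "HIGH",
--     "fix": "Add a FAQ page. AI agents pull from FAQs to answer buyer questions.",
-- }
-- _SYNONYM_TO_CHECK = {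
--     "about us": "Missing About Us Page",
--     "about": "Missing About Us Page",
--     "faq": "Missing FAQ Page",
--     "frequently asked questions": "Missing FAQ Page",
-- }
--
-- def audit_pages(pages):
--     # Start pessimistic: every issue is pending, then a single pass over the
--     # pages deletes each issue as soon as evidence for it appears.
--     pending = [_ABOUT_ISSUE, _FAQ_ISSUE]
--     for p in pages:
--         satisfied = _SYNONYM_TO_CHECK.get(p["title"].lower())
--         if satisfied is not None:
--             pending = [i for i in pending if i["check"] != satisfied]
--     return pending
-- ===== Notes on version B (the rewrite author's own statement) =====
-- stated objective: alternative
-- what changed: Inverts the control flow: instead of collecting all lowercased titles and then testing two absence conditions, B starts with every issue pending and makes one pass over the pages, deleting an issue as soon as a page title maps (via a synonym->check dict) to it; whatever survives the pass is returned.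
import Mathlib
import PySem

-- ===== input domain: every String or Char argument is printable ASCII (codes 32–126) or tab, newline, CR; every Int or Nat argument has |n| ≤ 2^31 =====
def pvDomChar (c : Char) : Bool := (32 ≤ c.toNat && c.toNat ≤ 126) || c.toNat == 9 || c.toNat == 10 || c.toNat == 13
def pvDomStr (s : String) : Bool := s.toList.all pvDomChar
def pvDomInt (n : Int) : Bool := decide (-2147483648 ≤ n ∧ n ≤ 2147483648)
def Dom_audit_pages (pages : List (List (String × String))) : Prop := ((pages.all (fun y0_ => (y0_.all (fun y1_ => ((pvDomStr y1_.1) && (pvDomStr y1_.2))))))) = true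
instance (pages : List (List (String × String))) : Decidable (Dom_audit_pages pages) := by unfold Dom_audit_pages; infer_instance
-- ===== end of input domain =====

-- B inverts A's control flow: it starts with every issue pending and deletes issues in
-- one pass over the pages as evidence for them appears, instead of collecting all titles
-- and testing two absence conditions.

-- ===== PORT A =====
def pvAboutIssueA : List (String × String) :=
  [("check", "Missing About Us Page"), ("product", "Pages"), ("severity", "HIGH"),
   ("fix", "Add an 'About Us' page. AI agents use this to understand store identity.")]

def pvFaqIssueA : List (String × String) :=
  [("check", "Missing FAQ Page"), ("product", "Pages"), ("severity", "HIGH"),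
   ("fix", "Add a FAQ page. AI agents pull from FAQs to answer buyer questions.")]

-- p["title"] (KeyError when absent is excluded by Pre_); getD is exact under Pre_.
def audit_pages (pages : List (List (String × String))) : List (List (String × String)) :=
  let found := pages.map (fun p => PySem.Str.lower ((PySem.Dict.mk p).getD "title" ""))
  let issues : List (List (String × String)) := []
  let issues := if "about us" ∉ found ∧ "about" ∉ found then issues ++ [pvAboutIssueA] else issues
  let issues := if "faq" ∉ found ∧ "frequently asked questions" ∉ found then issues ++ [pvFaqIssueA] else issues
  issues

-- ===== PORT B =====
def pvAboutIssueB : List (String × String) :=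
  [("check", "Missing About Us Page"), ("product", "Pages"), ("severity", "HIGH"),
   ("fix", "Add an 'About Us' page. AI agents use this to understand store identity.")]

def pvFaqIssueB : List (String × String) :=
  [("check", "Missing FAQ Page"), ("product", "Pages"), ("severity", "HIGH"),
   ("fix", "Add a FAQ page. AI agents pull from FAQs to answer buyer questions.")]

def pvSynToCheck : PySem.Dict String String :=
  PySem.Dict.mk
    [("about us", "Missing About Us Page"), ("about", "Missing About Us Page"),
     ("faq", "Missing FAQ Page"), ("frequently asked questions", "Missing FAQ Page")]

-- i["check"] on the pending issue dicts (the key is always present there); getD is exact.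
def audit_pages_alt (pages : List (List (String × String))) : List (List (String × String)) :=
  pages.foldl
    (fun pending p =>
      match pvSynToCheck.get? (PySem.Str.lower ((PySem.Dict.mk p).getD "title" "")) with
      | none => pending
      | some satisfied => pending.filter (fun i => (PySem.Dict.mk i).getD "check" "" ≠ satisfied))
    [pvAboutIssueB, pvFaqIssueB]

-- ===== PRECONDITION & SPEC =====
-- Pre_ excludes pages without a "title" key, where the Python A raises KeyError.
def Pre_audit_pages (pages : List (List (String × String))) : Prop :=
  (pages.all (fun p => (PySem.Dict.mk p).contains "title")) = true
instance (pages : List (List (String × String))) : Decidable (Pre_audit_pages pages) := by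
  unfold Pre_audit_pages; infer_instance

def pvWitness_audit_pages : (List (List (String × String))) :=
  [[("title", "Home")], [("title", "About Us"), ("body", "hi")]]

def Spec_audit_pages (pages : List (List (String × String))) (out : List (List (String × String))) : Prop := out = audit_pages_alt pages
instance (pages : List (List (String × String))) (out : List (List (String × String))) : Decidable (Spec_audit_pages pages out) := by unfold Spec_audit_pages; infer_instance

-- ===== CLAIM (what is proved, stated in full; the proofs are below) =====
def Claim_equal_audit_pages : Prop := ∀ (pages : List (List (String × String))), Dom_audit_pages pages → Pre_audit_pages pages → Spec_audit_pages pages (audit_pages pages)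

-- ===== LEMMAS AND PROOFS =====

-- B's step, as a per-page keep-predicate on an issue dict.
def pvKeep (t : String) (i : List (String × String)) : Bool :=
  match pvSynToCheck.get? t with
  | none => true
  | some satisfied => decide ((PySem.Dict.mk i).getD "check" "" ≠ satisfied)

def pvTitle (p : List (String × String)) : String :=
  PySem.Str.lower ((PySem.Dict.mk p).getD "title" "")

lemma step_eq_filter (pending : List (List (String × String))) (t : String) :
    (match pvSynToCheck.get? t with
     | none => pending
     | some satisfied =>
         pending.filter (fun i => (PySem.Dict.mk i).getD "check" "" ≠ satisfied)) =
    pending.filter (pvKeep t) := by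
  unfold pvKeep
  cases pvSynToCheck.get? t with
  | none => simp
  | some c => rfl

lemma foldl_filter (pages : List (List (String × String)))
    (pending : List (List (String × String))) :
    pages.foldl (fun pend p =>
      match pvSynToCheck.get? (PySem.Str.lower ((PySem.Dict.mk p).getD "title" "")) with
      | none => pend
      | some satisfied =>
          pend.filter (fun i => (PySem.Dict.mk i).getD "check" "" ≠ satisfied)) pending =
    pending.filter (fun i => pages.all (fun p => pvKeep (pvTitle p) i)) := by
  induction pages generalizing pending with
  | nil => simp
  | cons p ps ih =>
      rw [List.foldl_cons, step_eq_filter, ih, List.filter_filter]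
      exact List.filter_congr (fun a _ => by simp [pvTitle, Bool.and_comm])

lemma alt_eq_filter (pages : List (List (String × String))) :
    audit_pages_alt pages =
    [pvAboutIssueB, pvFaqIssueB].filter
      (fun i => pages.all (fun p => pvKeep (pvTitle p) i)) := by
  unfold audit_pages_alt
  exact foldl_filter _ _

lemma keep_about (t : String) :
    pvKeep t pvAboutIssueB = (!(t == "about us" || t == "about")) := by
  by_cases h1 : t = "about us"
  · subst h1; decide
  by_cases h2 : t = "about"
  · subst h2; decide
  by_cases h3 : t = "faq"
  · subst h3; decide
  by_cases h4 : t = "frequently asked questions"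
  · subst h4; decide
  have b1 : ("about us" == t) = false := beq_eq_false_iff_ne.mpr (Ne.symm h1)
  have b2 : ("about" == t) = false := beq_eq_false_iff_ne.mpr (Ne.symm h2)
  have b3 : ("faq" == t) = false := beq_eq_false_iff_ne.mpr (Ne.symm h3)
  have b4 : ("frequently asked questions" == t) = false := beq_eq_false_iff_ne.mpr (Ne.symm h4)
  have c1 : (t == "about us") = false := beq_eq_false_iff_ne.mpr h1
  have c2 : (t == "about") = false := beq_eq_false_iff_ne.mpr h2
  unfold pvKeep pvSynToCheck
  simp [PySem.Dict.get?, List.find?, b1, b2, b3, b4, c1, c2]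

lemma keep_faq (t : String) :
    pvKeep t pvFaqIssueB = (!(t == "faq" || t == "frequently asked questions")) := by
  by_cases h1 : t = "about us"
  · subst h1; decide
  by_cases h2 : t = "about"
  · subst h2; decide
  by_cases h3 : t = "faq"
  · subst h3; decide
  by_cases h4 : t = "frequently asked questions"
  · subst h4; decide
  have b1 : ("about us" == t) = false := beq_eq_false_iff_ne.mpr (Ne.symm h1)
  have b2 : ("about" == t) = false := beq_eq_false_iff_ne.mpr (Ne.symm h2)
  have b3 : ("faq" == t) = false := beq_eq_false_iff_ne.mpr (Ne.symm h3)
  have b4 : ("frequently asked questions" == t) = false := beq_eq_false_iff_ne.mpr (Ne.symm h4)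
  have c1 : (t == "faq") = false := beq_eq_false_iff_ne.mpr h3
  have c2 : (t == "frequently asked questions") = false := beq_eq_false_iff_ne.mpr h4
  unfold pvKeep pvSynToCheck
  simp [PySem.Dict.get?, List.find?, b1, b2, b3, b4, c1, c2]

lemma all_map_title (pages : List (List (String × String))) (i : List (String × String)) :
    pages.all (fun p => pvKeep (pvTitle p) i) = (pages.map pvTitle).all (fun t => pvKeep t i) := by
  induction pages with
  | nil => rfl
  | cons p ps ih => simp [ih]

lemma all_about_iff (l : List String) :
    (l.all fun t => !(t == "about us" || t == "about")) = true ↔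
    ("about us" ∉ l ∧ "about" ∉ l) := by
  simp only [List.all_eq_true, Bool.not_eq_eq_eq_not, Bool.not_true, Bool.or_eq_false_iff,
    beq_eq_false_iff_ne, ne_eq]
  constructor
  · intro h
    exact ⟨fun m => (h _ m).1 rfl, fun m => (h _ m).2 rfl⟩
  · rintro ⟨ha, hb⟩ x hx
    exact ⟨fun e => ha (e ▸ hx), fun e => hb (e ▸ hx)⟩

lemma all_faq_iff (l : List String) :
    (l.all fun t => !(t == "faq" || t == "frequently asked questions")) = true ↔
    ("faq" ∉ l ∧ "frequently asked questions" ∉ l) := by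
  simp only [List.all_eq_true, Bool.not_eq_eq_eq_not, Bool.not_true, Bool.or_eq_false_iff,
    beq_eq_false_iff_ne, ne_eq]
  constructor
  · intro h
    exact ⟨fun m => (h _ m).1 rfl, fun m => (h _ m).2 rfl⟩
  · rintro ⟨ha, hb⟩ x hx
    exact ⟨fun e => ha (e ▸ hx), fun e => hb (e ▸ hx)⟩

-- ===== VERDICT (by name: the statement is the Claim_ definition above) =====
theorem audit_pages_spec : Claim_equal_audit_pages := by
  intro pages _ _
  unfold Spec_audit_pages
  rw [alt_eq_filter]
  unfold audit_pages
  simp only [List.filter_cons, List.filter_nil, keep_about, keep_faq, all_map_title]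
  have hT : (pages.map (fun p => PySem.Str.lower ((PySem.Dict.mk p).getD "title" "")))
      = pages.map pvTitle := rfl
  rw [hT]
  generalize (pages.map pvTitle) = l
  simp only [all_about_iff, all_faq_iff]
  split_ifs <;> simp_all [pvAboutIssueA, pvFaqIssueA, pvAboutIssueB, pvFaqIssueB]
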